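-- pv_equiv track=rewrite | github.com/fopeczek/LoudReadingSkill | core/scoring.py | add_space_tokens
-- ===== SOURCE A (Python) =====
-- def add_space_tokens(tokens: list[str]) -> list[str]:
--     # Adds space token ([" "]) between each token, so "".join(correct_sentence_spaces) = correct_sentence_letters
--     token_spaces = []
--     for token in tokens:
--         if len(token_spaces) == 0:
--             token_spaces.append(token)
--         else:
--             token_spaces.append(" ")
--             token_spaces.append(token)
--     return token_spaces
-- ===== SOURCE B (Python) =====
-- def add_space_tokens(tokens: list[str]) -> list[str]:
--     # Build the whole output as spaces, then drop the tokens onto the even slots.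
--     result = [" "] * (2 * len(tokens) - 1)
--     result[0::2] = tokens
--     return result
-- ===== Notes on version B (the rewrite author's own statement) =====
-- stated objective: idiomatic
-- what changed: Replaces the per-token branch-and-append loop by allocating a list of 2*len(tokens)-1 spaces and slice-assigning the tokens onto the even indices.
import Mathlib
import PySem

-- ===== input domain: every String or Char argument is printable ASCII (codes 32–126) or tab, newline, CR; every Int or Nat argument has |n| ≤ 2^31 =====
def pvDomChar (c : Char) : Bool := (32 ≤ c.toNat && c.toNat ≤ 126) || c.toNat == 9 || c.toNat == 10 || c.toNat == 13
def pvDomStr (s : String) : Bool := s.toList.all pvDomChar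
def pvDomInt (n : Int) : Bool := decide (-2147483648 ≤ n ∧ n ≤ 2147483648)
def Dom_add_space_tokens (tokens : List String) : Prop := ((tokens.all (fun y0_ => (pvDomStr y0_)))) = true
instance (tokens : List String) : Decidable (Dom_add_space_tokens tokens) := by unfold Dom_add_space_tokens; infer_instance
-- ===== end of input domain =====

-- B builds the output by slice assignment onto a prefilled list of spaces instead of A's branch-and-append loop; same O(n) cost, more idiomatic.

-- ===== PORT A =====
def add_space_tokens (tokens : List String) : List String :=
  tokens.foldl
    (fun token_spaces token =>
      if token_spaces.length = 0 then token_spaces ++ [token]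
      else token_spaces ++ [" ", token])
    []

-- ===== PORT B =====
-- result = [" "] * (2*n - 1); result[0::2] = tokens : position i holds tokens[i/2] when i is even, " " when odd.
def add_space_tokens_alt (tokens : List String) : List String :=
  (List.range (2 * tokens.length - 1)).map
    (fun i => if i % 2 = 0 then tokens.getD (i / 2) " " else " ")

-- ===== PRECONDITION & SPEC =====
def Spec_add_space_tokens (tokens : List String) (out : List String) : Prop := out = add_space_tokens_alt tokens
instance (tokens : List String) (out : List String) : Decidable (Spec_add_space_tokens tokens out) := by unfold Spec_add_space_tokens; infer_instance

-- ===== CLAIM (what is proved, stated in full; the proofs are below) =====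
def Claim_equal_add_space_tokens : Prop := ∀ (tokens : List String), Dom_add_space_tokens tokens → Spec_add_space_tokens tokens (add_space_tokens tokens)

-- ===== LEMMAS AND PROOFS =====

-- Common reference form: " "-interspersed list, by two-step recursion.
def pvSp : List String → List String
  | [] => []
  | [t] => [t]
  | t :: u :: ts => t :: " " :: pvSp (u :: ts)

theorem pvA_foldl_ne_nil (ts : List String) (acc : List String) (h : acc ≠ []) :
    ts.foldl
      (fun token_spaces token =>
        if token_spaces.length = 0 then token_spaces ++ [token]
        else token_spaces ++ [" ", token]) acc
    = acc ++ ts.flatMap (fun t => [" ", t]) := by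
  induction ts generalizing acc with
  | nil => simp
  | cons t ts ih =>
    have hlen : acc.length ≠ 0 := by simpa using h
    simp only [List.foldl_cons, if_neg hlen]
    rw [ih (acc ++ [" ", t]) (by simp)]
    simp

theorem pvSp_eq_flatMap (t : String) (ts : List String) :
    pvSp (t :: ts) = t :: ts.flatMap (fun u => [" ", u]) := by
  induction ts generalizing t with
  | nil => simp [pvSp]
  | cons u ts ih => simp [pvSp, ih u]

theorem pvA_eq_pvSp (tokens : List String) : add_space_tokens tokens = pvSp tokens := by
  cases tokens with
  | nil => simp [add_space_tokens, pvSp]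
  | cons t ts =>
    simp only [add_space_tokens, List.foldl_cons, List.length_nil, List.nil_append, if_true]
    rw [pvA_foldl_ne_nil ts [t] (by simp), pvSp_eq_flatMap]
    simp

theorem pvB_eq_pvSp (tokens : List String) : add_space_tokens_alt tokens = pvSp tokens := by
  induction tokens using pvSp.induct with
  | case1 => simp [add_space_tokens_alt, pvSp]
  | case2 t => simp [add_space_tokens_alt, pvSp, List.range_succ]
  | case3 t u ts ih =>
    have hlen : 2 * (t :: u :: ts).length - 1 = 2 * ((u :: ts).length) - 1 + 1 + 1 := by
      simp; omega
    simp only [add_space_tokens_alt] at ih ⊢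
    rw [hlen, List.range_succ_eq_map, List.range_succ_eq_map]
    simp only [List.map_cons, List.map_map, pvSp]
    rw [← ih]
    refine List.cons_eq_cons.mpr ⟨by simp, List.cons_eq_cons.mpr ⟨by norm_num, ?_⟩⟩
    apply List.map_congr_left
    intro i _
    simp only [Function.comp, Nat.succ_eq_add_one]
    have hm : (i + 1 + 1) % 2 = i % 2 := by omega
    have hd : (i + 1 + 1) / 2 = i / 2 + 1 := by omega
    rw [hm, hd]
    split <;> simp

-- ===== VERDICT (by name: the statement is the Claim_ definition above) =====
theorem add_space_tokens_spec : Claim_equal_add_space_tokens := by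
  intro tokens _
  unfold Spec_add_space_tokens
  rw [pvA_eq_pvSp, pvB_eq_pvSp]
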